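-- pv_equiv track=rewrite | github.com/La-sociedad-del-silencio/TP3-NP-Completos | codigo/certificador_eficiente.py | validador_problema_tribu_del_agua
-- ===== SOURCE A (Python) =====
-- def validador_problema_tribu_del_agua(habilidades_maestros_agua, k, B, S):
--     if len(S) != k: #O(1)
--         return False
--     suma = 0 #O(1)
--     maestros = set() #O(1) Cada maestro debe estar en solo un grupo
--     dic_habilidades = dict() #O(1)
--
--     for info_maestro in habilidades_maestros_agua: #O(n)
--         maestro, habilidad = info_maestro #O(1)
--         dic_habilidades[maestro] = habilidad #O(1)
--
--     # O(n * k)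
--     for grupo in S: # k grupos: O(k)
--         suma_grupo = 0 #O(1)
--         for maestro in grupo: # En el peor caso O(n)
--             if maestro in maestros or maestro not in dic_habilidades:
--                 return False # El maestro dado está en más de un grupo
--             maestros.add(maestro) #O(1)
--             suma_grupo += dic_habilidades[maestro] #O(1)
--         suma += suma_grupo ** 2 #O(1)
--
--     if suma > B:  # O(1)
--         return False
--
--     for maestro, _habilidad in habilidades_maestros_agua: #O(n)
--         if maestro not in maestros:  # O(1)
--             return False # No tiene grupo asignado
--
--     return True
-- ===== SOURCE B (Python) =====
-- def validador_problema_tribu_del_agua(habilidades_maestros_agua, k, B, S):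
--     dic_habilidades = {}
--     for maestro, habilidad in habilidades_maestros_agua:
--         dic_habilidades[maestro] = habilidad
--     if len(S) != k:
--         return False
--     flat = [m for g in S for m in g]
--     if len(flat) != len(set(flat)):
--         return False  # some master appears in two groups (or twice in one)
--     if any(m not in dic_habilidades for m in flat):
--         return False  # unknown master
--     if set(flat) != set(dic_habilidades):
--         return False  # some master has no group
--     total = sum(sum(dic_habilidades[m] for m in g) ** 2 for g in S)
--     return total <= B
-- ===== Notes on version B (the rewrite author's own statement) =====
-- stated objective: alternative
-- what changed: Replaces A's single interleaved loop (seen-set growing while summing, with early returns, plus a trailing per-master scan) by separate declarative passes: flatten all groups, compare lengths against the deduplicated flat list to detect reuse, check membership and set-equality of assigned vs known masters, and only then compute the sum of squared group sums in one dedicated pass.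
import Mathlib
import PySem

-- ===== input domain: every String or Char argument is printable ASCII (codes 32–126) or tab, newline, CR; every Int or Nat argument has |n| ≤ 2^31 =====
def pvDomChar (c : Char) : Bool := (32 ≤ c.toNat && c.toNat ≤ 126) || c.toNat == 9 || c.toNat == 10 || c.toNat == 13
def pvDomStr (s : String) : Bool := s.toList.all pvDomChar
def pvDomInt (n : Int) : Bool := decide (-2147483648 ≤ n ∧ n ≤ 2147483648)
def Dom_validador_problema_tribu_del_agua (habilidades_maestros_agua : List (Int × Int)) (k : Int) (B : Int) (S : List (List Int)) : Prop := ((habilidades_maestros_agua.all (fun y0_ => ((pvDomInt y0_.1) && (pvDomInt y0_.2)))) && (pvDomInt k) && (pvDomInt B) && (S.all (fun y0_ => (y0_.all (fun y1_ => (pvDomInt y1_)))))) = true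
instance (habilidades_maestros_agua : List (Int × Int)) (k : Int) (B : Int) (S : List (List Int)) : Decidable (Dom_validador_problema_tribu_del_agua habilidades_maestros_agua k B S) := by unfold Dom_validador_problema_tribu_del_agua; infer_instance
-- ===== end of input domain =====

-- B replaces A's interleaved seen-set/summing loop and trailing scan by separate flatten, dedup-length,
-- membership, set-equality and summation passes (alternative decomposition, same cost).


-- ===== PORT A =====
-- the dict-building loop 'for info_maestro in …: dic[maestro] = habilidad'
def pvBuildDict (l : List (Int × Int)) : PySem.Dict Int Int :=
  l.foldl (fun d p => d.insert p.1 p.2) PySem.Dict.empty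

-- inner loop 'for maestro in grupo' with early 'return False' (none)
def pvLoopGrupo (d : PySem.Dict Int Int) : List Int → Int → PySem.Set Int → Option (Int × PySem.Set Int)
  | [], sg, seen => some (sg, seen)
  | m :: rest, sg, seen =>
    if PySem.Set.contains seen m || !(d.contains m) then none
    else pvLoopGrupo d rest (sg + d.getD m 0) (PySem.Set.add seen m)

-- outer loop 'for grupo in S'
def pvLoopS (d : PySem.Dict Int Int) : List (List Int) → Int → PySem.Set Int → Option (Int × PySem.Set Int)
  | [], suma, seen => some (suma, seen)
  | g :: gs, suma, seen =>
    match pvLoopGrupo d g 0 seen with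
    | none => none
    | some (sg, seen') => pvLoopS d gs (suma + sg ^ 2) seen'

def validador_problema_tribu_del_agua (habilidades_maestros_agua : List (Int × Int)) (k : Int) (B : Int) (S : List (List Int)) : Bool :=
  if (S.length : Int) ≠ k then false
  else
    let dic := pvBuildDict habilidades_maestros_agua
    match pvLoopS dic S 0 PySem.Set.empty with
    | none => false
    | some (suma, maestros) =>
      if suma > B then false
      else habilidades_maestros_agua.all (fun p => PySem.Set.contains maestros p.1)

-- ===== PORT B =====
def validador_problema_tribu_del_agua_alt (habilidades_maestros_agua : List (Int × Int)) (k : Int) (B : Int) (S : List (List Int)) : Bool :=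
  let dic := pvBuildDict habilidades_maestros_agua
  if (S.length : Int) ≠ k then false
  else
    let flat := S.flatMap (fun g => g)
    if (flat.length : Int) ≠ ((PySem.Set.ofList flat).length : Int) then false
    else if flat.any (fun m => !(dic.contains m)) then false
    else if !(PySem.Set.equal (PySem.Set.ofList flat) (PySem.Set.ofList dic.keys)) then false
    else
      decide ((S.foldl (fun t g => t + (g.foldl (fun s m => s + dic.getD m 0) 0) ^ 2) 0) ≤ B)

-- ===== PRECONDITION & SPEC =====
def Spec_validador_problema_tribu_del_agua (habilidades_maestros_agua : List (Int × Int)) (k : Int) (B : Int) (S : List (List Int)) (out : Bool) : Prop := out = validador_problema_tribu_del_agua_alt habilidades_maestros_agua k B S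
instance (habilidades_maestros_agua : List (Int × Int)) (k : Int) (B : Int) (S : List (List Int)) (out : Bool) : Decidable (Spec_validador_problema_tribu_del_agua habilidades_maestros_agua k B S out) := by unfold Spec_validador_problema_tribu_del_agua; infer_instance

-- ===== CLAIM (what is proved, stated in full; the proofs are below) =====
def Claim_equal_validador_problema_tribu_del_agua : Prop := ∀ (habilidades_maestros_agua : List (Int × Int)) (k : Int) (B : Int) (S : List (List Int)), Dom_validador_problema_tribu_del_agua habilidades_maestros_agua k B S → Spec_validador_problema_tribu_del_agua habilidades_maestros_agua k B S (validador_problema_tribu_del_agua habilidades_maestros_agua k B S)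

-- ===== LEMMAS AND PROOFS =====

-- group sum as B computes it
def pvGSum (d : PySem.Dict Int Int) (g : List Int) : Int :=
  g.foldl (fun s m => s + d.getD m 0) 0

def pvTSum (d : PySem.Dict Int Int) (S : List (List Int)) : Int :=
  S.foldl (fun t g => t + pvGSum d g ^ 2) 0

lemma pvGSum_cons (d : PySem.Dict Int Int) (m : Int) (rest : List Int) :
    pvGSum d (m :: rest) = d.getD m 0 + pvGSum d rest := by
  simp [pvGSum, PySem.List.foldl_add rest (fun m => d.getD m 0)]

lemma pvTSum_cons (d : PySem.Dict Int Int) (g : List Int) (gs : List (List Int)) :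
    pvTSum d (g :: gs) = pvGSum d g ^ 2 + pvTSum d gs := by
  simp [pvTSum, PySem.List.foldl_add gs (fun g => pvGSum d g ^ 2)]

-- ofList keeps a subsequence of its input (first occurrences in order)
lemma pvOfList_sublist (l : List Int) : (PySem.Set.ofList l).Sublist l := by
  induction l using List.reverseRecOn with
  | nil => simp [PySem.Set.ofList]
  | append_singleton l x ih =>
    rw [PySem.Set.ofList_append_singleton]
    by_cases hx : x ∈ PySem.Set.ofList l
    · rw [PySem.Set.add_of_mem hx]
      exact ih.trans (List.sublist_append_left l [x])
    · rw [PySem.Set.add_of_not_mem hx]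
      exact ih.append (List.Sublist.refl [x])

lemma pvNodup_iff_length (l : List Int) :
    l.Nodup ↔ (PySem.Set.ofList l).length = l.length := by
  constructor
  · intro h; rw [PySem.Set.ofList_eq_self_of_nodup l h]
  · intro h
    have := (pvOfList_sublist l).eq_of_length h
    rw [← this]; exact PySem.Set.nodup_ofList l

lemma pvLoopGrupo_eq (d : PySem.Dict Int Int) (g : List Int) (sg : Int) (seen : PySem.Set Int)
    (hseen : seen.Nodup) :
    pvLoopGrupo d g sg seen =
      if g.Nodup ∧ ∀ m ∈ g, m ∉ seen ∧ d.contains m = true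
      then some (sg + pvGSum d g, seen ++ g) else none := by
  induction g generalizing sg seen with
  | nil => simp [pvLoopGrupo, pvGSum]
  | cons m rest ih =>
    rw [pvLoopGrupo]
    by_cases hm : m ∈ seen
    · have hb : (PySem.Set.contains seen m || !(d.contains m)) = true := by simp [hm]
      rw [hb, if_pos rfl, if_neg]
      rintro ⟨-, hall⟩; exact (hall m List.mem_cons_self).1 hm
    · by_cases hd : d.contains m = true
      · have hb : (PySem.Set.contains seen m || !(d.contains m)) = false := by simp [hm, hd]
        rw [hb, if_neg (by simp), PySem.Set.add_of_not_mem hm,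
          ih _ _ (hseen.append (List.nodup_singleton m) (by simp [hm]))]
        by_cases hc : rest.Nodup ∧ ∀ x ∈ rest, x ∉ seen ++ [m] ∧ d.contains x = true
        · rw [if_pos hc, if_pos]
          · have hv : sg + d.getD m 0 + pvGSum d rest = sg + pvGSum d (m :: rest) := by
              rw [pvGSum_cons]; ring
            rw [hv]; simp
          · obtain ⟨hnd, hall⟩ := hc
            refine ⟨List.nodup_cons.mpr ⟨fun hmr => ?_, hnd⟩, ?_⟩
            · exact (hall m hmr).1 (by simp)
            · intro x hx
              rcases List.mem_cons.mp hx with rfl | hx'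
              · exact ⟨hm, hd⟩
              · exact ⟨fun hxs => (hall x hx').1 (by simp [hxs]), (hall x hx').2⟩
        · rw [if_neg hc, if_neg]
          rintro ⟨hnd, hall⟩
          refine hc ⟨(List.nodup_cons.mp hnd).2, fun x hx => ?_⟩
          have h1 := hall x (List.mem_cons_of_mem m hx)
          refine ⟨fun hxs => ?_, h1.2⟩
          rcases List.mem_append.mp hxs with h' | h'
          · exact h1.1 h'
          · have hxm : x = m := by simpa using h'
            exact (List.nodup_cons.mp hnd).1 (hxm ▸ hx)
      · have hb : (PySem.Set.contains seen m || !(d.contains m)) = true := by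
          simp [Bool.eq_false_iff.mpr hd]
        rw [hb, if_pos rfl, if_neg]
        rintro ⟨-, hall⟩; exact hd (hall m List.mem_cons_self).2

lemma pvLoopS_eq (d : PySem.Dict Int Int) (S : List (List Int)) (suma : Int) (seen : PySem.Set Int)
    (hseen : seen.Nodup) :
    pvLoopS d S suma seen =
      if (S.flatMap (fun g => g)).Nodup ∧ ∀ m ∈ S.flatMap (fun g => g), m ∉ seen ∧ d.contains m = true
      then some (suma + pvTSum d S, seen ++ S.flatMap (fun g => g)) else none := by
  induction S generalizing suma seen with
  | nil => simp [pvLoopS, pvTSum]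
  | cons g gs ih =>
    rw [pvLoopS, pvLoopGrupo_eq d g 0 seen hseen]
    by_cases hc : g.Nodup ∧ ∀ m ∈ g, m ∉ seen ∧ d.contains m = true
    · rw [if_pos hc]
      have hsg : (seen ++ g).Nodup := by
        refine hseen.append hc.1 (fun a ha hag => ?_)
        exact (hc.2 a hag).1 ha
      show pvLoopS d gs (suma + (0 + pvGSum d g) ^ 2) (seen ++ g) = _
      rw [ih _ _ hsg]
      by_cases h2 : (gs.flatMap (fun g => g)).Nodup ∧
          ∀ m ∈ gs.flatMap (fun g => g), m ∉ seen ++ g ∧ d.contains m = true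
      · rw [if_pos h2, if_pos]
        · have hv : suma + (0 + pvGSum d g) ^ 2 + pvTSum d gs = suma + pvTSum d (g :: gs) := by
            rw [pvTSum_cons]; ring
          rw [hv]; simp
        · constructor
          · rw [List.flatMap_cons, List.nodup_append]
            exact ⟨hc.1, h2.1, fun a hag b hbf heq => ((h2.2 b hbf).1 (by simp [heq ▸ hag]))⟩
          · intro m hm
            rw [List.flatMap_cons, List.mem_append] at hm
            rcases hm with hm | hm
            · exact (hc.2 m hm)
            · exact ⟨fun hs => (h2.2 m hm).1 (by simp [hs]), (h2.2 m hm).2⟩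
      · rw [if_neg h2, if_neg]
        rintro ⟨hnd, hall⟩
        rw [List.flatMap_cons, List.nodup_append] at hnd
        refine h2 ⟨hnd.2.1, fun m hm => ?_⟩
        have h1 := hall m (by rw [List.flatMap_cons, List.mem_append]; exact Or.inr hm)
        refine ⟨fun hs => ?_, h1.2⟩
        rcases List.mem_append.mp hs with h' | h'
        · exact h1.1 h'
        · exact hnd.2.2 m h' m hm rfl
    · rw [if_neg hc]
      show none = _
      rw [if_neg]
      rintro ⟨hnd, hall⟩
      rw [List.flatMap_cons, List.nodup_append] at hnd
      refine hc ⟨hnd.1, fun m hm => (hall m ?_)⟩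
      rw [List.flatMap_cons, List.mem_append]; exact Or.inl hm

lemma pvKeys (hab : List (Int × Int)) :
    (pvBuildDict hab).keys = PySem.Set.ofList (hab.map (·.1)) := by
  rw [pvBuildDict, PySem.Dict.keys_foldl_insert_key]
  rfl

-- ===== VERDICT (by name: the statement is the Claim_ definition above) =====
theorem validador_problema_tribu_del_agua_spec : Claim_equal_validador_problema_tribu_del_agua := by
  intro hab k B S _
  unfold Spec_validador_problema_tribu_del_agua
  unfold validador_problema_tribu_del_agua validador_problema_tribu_del_agua_alt
  by_cases hk : (S.length : Int) ≠ k
  · rw [if_pos hk, if_pos hk]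
  · rw [if_neg hk, if_neg hk]
    set d := pvBuildDict hab with hd
    set flat := S.flatMap (fun g : List Int => g) with hflat
    dsimp only
    rw [pvLoopS_eq d S 0 PySem.Set.empty List.nodup_nil]
    have hkmem : ∀ x : Int, x ∈ PySem.Set.ofList d.keys ↔ x ∈ hab.map (·.1) := by
      intro x
      rw [PySem.Set.mem_ofList, hd, pvKeys hab, PySem.Set.mem_ofList]
    by_cases hnd : flat.Nodup
    · have hlen : ¬ ((flat.length : Int) ≠ ((PySem.Set.ofList flat).length : Int)) := by
        simp [(pvNodup_iff_length flat).mp hnd]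
      by_cases hcont : ∀ m ∈ flat, d.contains m = true
      · have hcond : flat.Nodup ∧ ∀ m ∈ flat, m ∉ (PySem.Set.empty : PySem.Set Int) ∧ d.contains m = true :=
          ⟨hnd, fun m hm => ⟨by simp [PySem.Set.empty], hcont m hm⟩⟩
        rw [if_pos hcond, if_neg hlen]
        have hany : (flat.any fun m => !d.contains m) = false := by
          simp only [List.any_eq_false]
          intro m hm
          simp [hcont m hm]
        rw [hany, if_neg (show ¬ (false = true) from by simp)]
        have hts : S.foldl (fun t g => t + (g.foldl (fun s m => s + d.getD m 0) 0) ^ 2) 0 = pvTSum d S := by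
          simp [pvTSum, pvGSum]
        by_cases hcov : ∀ x ∈ hab.map (·.1), x ∈ flat
        · have heq : PySem.Set.equal (PySem.Set.ofList flat) (PySem.Set.ofList d.keys) = true := by
            rw [PySem.Set.equal_iff]
            intro x
            rw [PySem.Set.mem_ofList, hkmem x]
            constructor
            · intro hx
              have h3 := hcont x hx
              rw [PySem.Dict.contains_iff_mem_keys, hd, pvKeys hab, PySem.Set.mem_ofList] at h3
              exact h3
            · exact hcov x
          have hall : (hab.all fun p => PySem.Set.contains (PySem.Set.empty ++ flat) p.1) = true := by
            simp only [List.all_eq_true]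
            intro p hp
            have hpf : p.1 ∈ flat := hcov p.1 (List.mem_map.mpr ⟨p, hp, rfl⟩)
            simp [PySem.Set.empty, hpf]
          rw [heq]
          simp only [Bool.not_true]
          rw [if_neg (show ¬ (false = true) from by simp), hts]
          by_cases hB : 0 + pvTSum d S > B
          · rw [if_pos hB]
            have hB' : ¬ (pvTSum d S ≤ B) := by omega
            simp [hB']
          · rw [if_neg hB, hall]
            have hB' : pvTSum d S ≤ B := by omega
            simp [hB']
        · push_neg at hcov
          obtain ⟨x, hxk, hxf⟩ := hcov
          have heq : PySem.Set.equal (PySem.Set.ofList flat) (PySem.Set.ofList d.keys) = false := by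
            rw [Bool.eq_false_iff]
            intro h
            rw [PySem.Set.equal_iff] at h
            have h4 := (h x).mpr ((hkmem x).mpr hxk)
            rw [PySem.Set.mem_ofList] at h4
            exact hxf h4
          have hall : (hab.all fun p => PySem.Set.contains (PySem.Set.empty ++ flat) p.1) = false := by
            rw [Bool.eq_false_iff]
            intro h
            rw [List.all_eq_true] at h
            obtain ⟨p, hp, hpx⟩ := List.mem_map.mp hxk
            have h5 := h p hp
            rw [hpx] at h5
            apply hxf
            simpa [PySem.Set.empty] using h5
          rw [heq]
          show (if 0 + pvTSum d S > B then false
              else hab.all fun p => PySem.Set.contains (PySem.Set.empty ++ flat) p.1) = _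
          by_cases hB : 0 + pvTSum d S > B
          · rw [if_pos hB]; simp
          · rw [if_neg hB, hall]; simp
      · have hcond : ¬ (flat.Nodup ∧ ∀ m ∈ flat, m ∉ (PySem.Set.empty : PySem.Set Int) ∧ d.contains m = true) := by
          rintro ⟨-, hall⟩
          exact hcont (fun m hm => (hall m hm).2)
        rw [if_neg hcond, if_neg hlen]
        push_neg at hcont
        obtain ⟨m, hm, hmc⟩ := hcont
        have hany : (flat.any fun m => !d.contains m) = true := by
          rw [List.any_eq_true]
          exact ⟨m, hm, by simp [Bool.eq_false_iff.mpr hmc]⟩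
        simp [hany]
    · have hcond : ¬ (flat.Nodup ∧ ∀ m ∈ flat, m ∉ (PySem.Set.empty : PySem.Set Int) ∧ d.contains m = true) := by
        rintro ⟨h, -⟩
        exact hnd h
      rw [if_neg hcond]
      have hlen : ((flat.length : Int) ≠ ((PySem.Set.ofList flat).length : Int)) := by
        intro h
        exact hnd ((pvNodup_iff_length flat).mpr (by exact_mod_cast h.symm))
      rw [if_pos hlen]
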